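-- pv_equiv track=rewrite | github.com/singhuist/cyberbullying-detection | embeddings.py | simpleEncode
-- ===== SOURCE A (Python) =====
-- def simpleEncode(sentenceList):
--     '''
--     Encodes sentences into numbers, simply adding a new entry for a new word
--     :param sentenceList: List of sentences to be vectorised
--     :return: encoded list of sentences
--     '''
--
--     dictionary = {}
--     counter = 0
--     encodedData = []
--     padlength = 0
--     for s in sentenceList:
--         encodedsent = []
--         s = s.split()
--         for w in range(len(s)):
--             word = s[w]
--             if word not in dictionary:
--                 dictionary[word] = counter + 1
--                 counter = counter + 1
--             s[w] = dictionary[word]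
--             encodedsent.append(s[w])
--         encodedData.append(encodedsent)
--
--         if len(encodedsent)>padlength:
--             padlength = len(encodedsent)
--
--     #pad data to ensure equal size
--     ##encodedData = keras.preprocessing.sequence.pad_sequences(encodedData, value=0, padding='post', maxlen=padlength)
--
--     return encodedData, padlength
-- ===== SOURCE B (Python) =====
-- def simpleEncode(sentenceList):
--     # Build the vocabulary first (ids in order of first appearance), then encode.
--     dictionary = {}
--     counter = 0
--     for s in sentenceList:
--         for word in s.split():
--             if word not in dictionary:
--                 counter += 1
--                 dictionary[word] = counter
--     encodedData = [[dictionary[w] for w in s.split()] for s in sentenceList]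
--     padlength = max((len(s.split()) for s in sentenceList), default=0)
--     return encodedData, padlength
-- ===== Notes on version B (the rewrite author's own statement) =====
-- stated objective: idiomatic
-- what changed: A interleaves vocabulary building, encoding and max-length tracking in one nested loop; B first builds the vocabulary in a dedicated pass, then encodes every sentence with a comprehension against the finished dict and computes padlength as a separate max over word counts.
import Mathlib
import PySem

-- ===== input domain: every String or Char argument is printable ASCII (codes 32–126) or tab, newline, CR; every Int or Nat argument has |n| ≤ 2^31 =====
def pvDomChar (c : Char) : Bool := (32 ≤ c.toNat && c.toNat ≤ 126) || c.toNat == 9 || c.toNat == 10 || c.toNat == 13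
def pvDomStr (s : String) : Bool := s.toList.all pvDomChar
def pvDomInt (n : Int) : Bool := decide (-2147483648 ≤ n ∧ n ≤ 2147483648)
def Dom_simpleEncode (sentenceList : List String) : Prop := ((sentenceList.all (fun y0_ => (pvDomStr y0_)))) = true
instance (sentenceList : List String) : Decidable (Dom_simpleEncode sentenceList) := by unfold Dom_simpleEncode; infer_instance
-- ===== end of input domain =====

-- B restructures A's single interleaved loop into build-vocabulary-then-encode (plus a separate max); same result, idiomatic decomposition.

-- ===== PORT A =====
-- inner loop: `for w in range(len(s)): … if word not in dictionary: insert; append dictionary[word]`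
-- (dictionary[word] is looked up right after the word was ensured present, so the `.getD 0` default is never used)
def encLoopA : List String → PySem.Dict String Int → Int → List Int → (List Int × PySem.Dict String Int × Int)
  | [], d, c, acc => (acc, d, c)
  | w :: ws, d, c, acc =>
    let dc := if d.contains w then (d, c) else (d.insert w (c + 1), c + 1)
    encLoopA ws dc.1 dc.2 (acc ++ [(dc.1.get? w).getD 0])

def outLoopA : List String → PySem.Dict String Int → Int → List (List Int) → Int → (List (List Int) × Int)
  | [], _, _, acc, pad => (acc, pad)
  | s :: rest, d, c, acc, pad =>
    let r := encLoopA (PySem.Str.split₀ s) d c []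
    let pad' := if ((r.1.length : Int)) > pad then ((r.1.length : Int)) else pad
    outLoopA rest r.2.1 r.2.2 (acc ++ [r.1]) pad'

def simpleEncode (sentenceList : List String) : List (List Int) × Int :=
  outLoopA sentenceList PySem.Dict.empty 0 [] 0

-- ===== PORT B =====
-- first pass of Source B: `if word not in dictionary: counter += 1; dictionary[word] = counter`
def bStep (dc : PySem.Dict String Int × Int) (w : String) : PySem.Dict String Int × Int :=
  if dc.1.contains w then dc else (dc.1.insert w (dc.2 + 1), dc.2 + 1)

-- `dictionary[w]` in the comprehension never misses (every word was inserted in the first pass)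
def simpleEncode_alt (sentenceList : List String) : List (List Int) × Int :=
  let dc := sentenceList.foldl (fun dc s => (PySem.Str.split₀ s).foldl bStep dc) (PySem.Dict.empty, 0)
  let encodedData := sentenceList.map (fun s => (PySem.Str.split₀ s).map (fun w => (dc.1.get? w).getD 0))
  let padlength := (PySem.List.max? (sentenceList.map (fun s => (((PySem.Str.split₀ s).length : Int)))) (fun x => x)).getD 0
  (encodedData, padlength)

-- ===== PRECONDITION & SPEC =====
def Spec_simpleEncode (sentenceList : List String) (out : List (List Int) × Int) : Prop := out = simpleEncode_alt sentenceList
instance (sentenceList : List String) (out : List (List Int) × Int) : Decidable (Spec_simpleEncode sentenceList out) := by unfold Spec_simpleEncode; infer_instance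

-- ===== CLAIM (what is proved, stated in full; the proofs are below) =====
def Claim_equal_simpleEncode : Prop := ∀ (sentenceList : List String), Dom_simpleEncode sentenceList → Spec_simpleEncode sentenceList (simpleEncode sentenceList)

-- ===== LEMMAS AND PROOFS =====

-- once a key has a value, further bStep folds never change it
theorem bStep_pres (dc : PySem.Dict String Int × Int) (w x : String) (v : Int)
    (h : dc.1.get? x = some v) : (bStep dc w).1.get? x = some v := by
  unfold bStep
  split
  · exact h
  · rename_i hc
    simp only
    rw [PySem.Dict.get?_insert]
    split
    · rename_i hxw
      subst hxw
      rw [PySem.Dict.contains_eq_isSome_get?, h] at hc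
      simp at hc
    · exact h

theorem foldl_bStep_pres (ws : List String) (dc : PySem.Dict String Int × Int) (x : String) (v : Int)
    (h : dc.1.get? x = some v) : ((ws.foldl bStep dc).1.get? x = some v) := by
  induction ws generalizing dc with
  | nil => exact h
  | cons w ws ih => exact ih _ (bStep_pres dc w x v h)

theorem build_pres (sl : List String) (dc : PySem.Dict String Int × Int) (x : String) (v : Int)
    (h : dc.1.get? x = some v)
    : ((sl.foldl (fun dc s => (PySem.Str.split₀ s).foldl bStep dc) dc).1.get? x = some v) := by
  induction sl generalizing dc with
  | nil => exact h
  | cons s sl ih => exact ih _ (foldl_bStep_pres _ dc x v h)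

theorem bStep_self (dc : PySem.Dict String Int × Int) (w : String) :
    ((bStep dc w).1.get? w).isSome := by
  unfold bStep
  split
  · rename_i hc
    rwa [PySem.Dict.contains_eq_isSome_get?] at hc
  · simp [PySem.Dict.get?_insert_self]

theorem encLoopA_eq (ws : List String) (d : PySem.Dict String Int) (c : Int) (acc : List Int)
    (ext : PySem.Dict String Int)
    (hext : ∀ x v, ((ws.foldl bStep (d, c)).1.get? x = some v) → ext.get? x = some v) :
    encLoopA ws d c acc
      = (acc ++ ws.map (fun w => (ext.get? w).getD 0), ws.foldl bStep (d, c)) := by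
  induction ws generalizing d c acc with
  | nil => simp [encLoopA]
  | cons w ws ih =>
    have hstep : (if d.contains w then ((d : PySem.Dict String Int), c)
        else (d.insert w (c + 1), c + 1)) = bStep (d, c) w := rfl
    show encLoopA (w :: ws) d c acc = _
    unfold encLoopA
    rw [hstep]
    have hsome := bStep_self (d, c) w
    obtain ⟨v, hv⟩ := Option.isSome_iff_exists.mp hsome
    have hfin : ((ws.foldl bStep (bStep (d, c) w)).1.get? w = some v) :=
      foldl_bStep_pres ws _ w v hv
    have hextw : ext.get? w = some v := hext w v (by simpa [List.foldl_cons] using hfin)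
    rw [ih (bStep (d, c) w).1 (bStep (d, c) w).2 _
      (fun x u hu => hext x u (by simpa [List.foldl_cons] using hu))]
    simp [hv, hextw, List.append_assoc]

theorem outLoopA_eq (sl : List String) (d : PySem.Dict String Int) (c : Int)
    (acc : List (List Int)) (pad : Int) (ext : PySem.Dict String Int)
    (hext : ∀ x v, ((sl.foldl (fun dc s => (PySem.Str.split₀ s).foldl bStep dc) (d, c)).1.get? x = some v) → ext.get? x = some v) :
    outLoopA sl d c acc pad
      = (acc ++ sl.map (fun s => (PySem.Str.split₀ s).map (fun w => (ext.get? w).getD 0)),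
         sl.foldl (fun p s => max p ((PySem.Str.split₀ s).length : Int)) pad) := by
  induction sl generalizing d c acc pad with
  | nil => simp [outLoopA]
  | cons s sl ih =>
    unfold outLoopA
    rw [encLoopA_eq (PySem.Str.split₀ s) d c [] ext
      (fun x v hv => hext x v (build_pres sl _ x v hv))]
    simp only [List.nil_append]
    rw [ih ((PySem.Str.split₀ s).foldl bStep (d, c)).1 ((PySem.Str.split₀ s).foldl bStep (d, c)).2 _ _
      (fun x u hu => hext x u (by simpa [List.foldl_cons] using hu))]
    have hm : (if ((((PySem.Str.split₀ s).map (fun w => (ext.get? w).getD 0)).length : Int)) > pad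
        then ((((PySem.Str.split₀ s).map (fun w => (ext.get? w).getD 0)).length : Int)) else pad)
        = max pad (((PySem.Str.split₀ s).length : Int)) := by
      simp only [List.length_map]
      rcases le_or_gt (((PySem.Str.split₀ s).length : Int)) pad with h | h
      · rw [if_neg (by omega), max_eq_left h]
      · rw [if_pos h, max_eq_right (le_of_lt h)]
    rw [hm]
    simp [List.append_assoc]

theorem padFold_eq_max? (lens : List Int) (hnn : ∀ x ∈ lens, 0 ≤ x) :
    lens.foldl (fun p n => max p n) 0 = (PySem.List.max? lens (fun x => x)).getD 0 := by
  cases lens with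
  | nil => simp [PySem.List.max?]
  | cons x t =>
    rw [PySem.List.max?_id_cons]
    have hx : max (0 : Int) x = x := max_eq_right (hnn x (List.mem_cons_self))
    simp [List.foldl_cons, hx]

-- ===== VERDICT (by name: the statement is the Claim_ definition above) =====
theorem simpleEncode_spec : Claim_equal_simpleEncode := by
  intro sl _
  unfold Spec_simpleEncode simpleEncode simpleEncode_alt
  rw [outLoopA_eq sl PySem.Dict.empty 0 [] 0
      (sl.foldl (fun dc s => (PySem.Str.split₀ s).foldl bStep dc) (PySem.Dict.empty, 0)).1
      (fun _ _ h => h)]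
  simp only [List.nil_append]
  refine Prod.ext rfl ?_
  simp only
  have : sl.foldl (fun p s => max p ((PySem.Str.split₀ s).length : Int)) 0
      = (sl.map (fun s => (((PySem.Str.split₀ s).length : Int)))).foldl (fun p n => max p n) 0 := by
    rw [List.foldl_map]
  rw [this, padFold_eq_max?]
  intro x hx
  simp only [List.mem_map] at hx
  obtain ⟨s, _, rfl⟩ := hx
  positivity
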